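-- pv_equiv track=rewrite | github.com/luismarioescobarrosalesciencias/Inteligencia-Artificial-2022 | nreinas.py | encuentra_conflictos_da
-- ===== SOURCE A (Python) =====
-- def encuentra_conflictos_da(gen):
--     conflictos = 0
--     conflictos_lista = {}
--     # Llenamos el diccionario
--     for n in range(((len(gen))*2)-1):
--         conflictos_lista[n] = 0 # Positivos
--     # Recorremos nuestro gen y a partir de ahi por cada aparicion que haya de una reina en
--     # la diagonal con un indice en especifico sumamos una aparicion
--     for n in range(len(gen)):
--         columna = n
--         fila = gen[n]
--         indice_diagonal = columna + fila
--         agrega_n = conflictos_lista.get(indice_diagonal)+1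
--         conflictos_lista[indice_diagonal] = agrega_n
--     # Recorremos el diccionario de apariciones, si hay mas de una reina en la diagonal agregamos el numero
--     # de reinas en conflicto
--     for n in range(((len(gen))*2)-1):
--         if conflictos_lista[n] > 1:# Positivos
--             agrega_n = conflictos_lista[n]
--             conflictos = conflictos + agrega_n
--     return conflictos
-- ===== SOURCE B (Python) =====
-- def encuentra_conflictos_da(gen):
--     # sort the flat diagonal indices, then count run lengths of equal
--     # consecutive values in a single scan; runs longer than 1 are conflicts
--     diag = sorted(i + v for i, v in enumerate(gen))
--     total = 0
--     i = 0
--     n = len(diag)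
--     while i < n:
--         j = i + 1
--         while j < n and diag[j] == diag[i]:
--             j += 1
--         if j - i > 1:
--             total += j - i
--         i = j
--     return total
-- ===== Notes on version B (the rewrite author's own statement) =====
-- stated objective: alternative
-- what changed: B replaces A's pre-filled dictionary bucketing (fill 2n-1 keys, increment per queen, rescan all keys) with sort-the-diagonal-indices and one scan counting runs of equal consecutive values.
import Mathlib
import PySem

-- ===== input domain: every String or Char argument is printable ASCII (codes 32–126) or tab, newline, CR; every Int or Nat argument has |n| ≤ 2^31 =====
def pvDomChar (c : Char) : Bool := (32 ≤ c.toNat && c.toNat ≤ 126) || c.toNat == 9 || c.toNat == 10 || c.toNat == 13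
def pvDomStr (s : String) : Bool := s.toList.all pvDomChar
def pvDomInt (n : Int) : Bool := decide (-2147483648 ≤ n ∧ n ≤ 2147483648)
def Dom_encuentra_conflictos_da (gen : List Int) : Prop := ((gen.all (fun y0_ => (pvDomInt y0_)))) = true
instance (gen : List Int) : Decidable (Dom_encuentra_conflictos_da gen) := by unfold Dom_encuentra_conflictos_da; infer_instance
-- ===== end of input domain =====

-- B replaces A's pre-filled dict bucketing with sort-the-diagonals + one run-counting scan (alternative algorithm, similar cost).


-- ===== PORT A =====
def encuentra_conflictos_da (gen : List Int) : Int :=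
  let conflictos : Int := 0
  -- for n in range(len(gen)*2-1): conflictos_lista[n] = 0
  let d0 : PySem.Dict Int Int :=
    (PySem.List.pyRange 0 (PySem.List.len gen * 2 - 1)).foldl
      (fun d n => d.insert n 0) PySem.Dict.empty
  -- for n in range(len(gen)): d[n+gen[n]] = d.get(n+gen[n]) + 1.  Python's `.get`
  -- yields None on a missing key and `None + 1` raises TypeError; Pre_ excludes
  -- exactly those inputs, and on Pre_ the key is present so `getD _ _ 0` is exact.
  let d1 : PySem.Dict Int Int :=
    (PySem.List.pyRange 0 (PySem.List.len gen)).foldl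
      (fun d n =>
        let fila := PySem.List.pyGetD gen n 0   -- gen[n], n always in range here
        let indice_diagonal := n + fila
        d.insert indice_diagonal (d.getD indice_diagonal 0 + 1)) d0
  -- for n in range(len(gen)*2-1): if d[n] > 1: conflictos += d[n]  (key n pre-filled)
  (PySem.List.pyRange 0 (PySem.List.len gen * 2 - 1)).foldl
    (fun c n => if d1.getD n 0 > 1 then c + d1.getD n 0 else c) conflictos

-- ===== PORT B =====
-- diag = sorted(i + v for i, v in enumerate(gen))
def pvDiag (gen : List Int) : List Int :=
  (PySem.List.enumerate gen).map (fun p => p.1 + p.2)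

-- length of the inner while loop's run: how many leading elements equal x
def pvRun (x : Int) : List Int → Nat
  | [] => 0
  | y :: ys => if y = x then pvRun x ys + 1 else 0

-- the outer while loop over i: each step consumes one run (suffix recursion)
def pvScan : List Int → Int
  | [] => 0
  | x :: ys =>
      (if pvRun x ys + 1 > 1 then ((pvRun x ys : Int) + 1) else 0)
        + pvScan (ys.drop (pvRun x ys))
termination_by xs => xs.length
decreasing_by simp

def encuentra_conflictos_da_alt (gen : List Int) : Int :=
  pvScan (PySem.List.sorted (pvDiag gen) (fun x => x) false)

-- ===== PRECONDITION & SPEC =====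
-- Pre_ excludes exactly the inputs where A raises TypeError: some diagonal index
-- i + gen[i] misses the pre-filled keys 0..2*len(gen)-2, so dict.get gives None.
def Pre_encuentra_conflictos_da (gen : List Int) : Prop :=
  ∀ p ∈ PySem.List.enumerate gen, 0 ≤ p.1 + p.2 ∧ p.1 + p.2 < PySem.List.len gen * 2 - 1
instance (gen : List Int) : Decidable (Pre_encuentra_conflictos_da gen) := by
  unfold Pre_encuentra_conflictos_da; infer_instance
def pvWitness_encuentra_conflictos_da : List Int := [0, 0, 0]

def Spec_encuentra_conflictos_da (gen : List Int) (out : Int) : Prop := out = encuentra_conflictos_da_alt gen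
instance (gen : List Int) (out : Int) : Decidable (Spec_encuentra_conflictos_da gen out) := by unfold Spec_encuentra_conflictos_da; infer_instance

-- ===== CLAIM (what is proved, stated in full; the proofs are below) =====
def Claim_equal_encuentra_conflictos_da : Prop := ∀ (gen : List Int), Dom_encuentra_conflictos_da gen → Pre_encuentra_conflictos_da gen → Spec_encuentra_conflictos_da gen (encuentra_conflictos_da gen)
-- ===== LEMMAS AND PROOFS =====

-- the number of queens sitting on a shared diagonal, as a length
def pvDup (D : List Int) : Int :=
  ((D.filter (fun x => decide (1 < D.count x))).length : Int)

theorem pvRun_take (x : Int) (ys : List Int) :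
    ys.take (pvRun x ys) = List.replicate (pvRun x ys) x := by
  induction ys with
  | nil => simp [pvRun]
  | cons y ys ih =>
    simp only [pvRun]
    split
    · next h => subst h; simp [List.replicate_succ, ih]
    · simp

theorem pvRun_drop_head_ne (x : Int) (ys : List Int) :
    ∀ z ∈ (ys.drop (pvRun x ys)).head?, z ≠ x := by
  induction ys with
  | nil => simp
  | cons y t ih =>
    by_cases h : y = x
    · simp only [pvRun, if_pos h, List.drop_succ_cons]; exact ih
    · simp only [pvRun, if_neg h, List.drop_zero, List.head?_cons]
      intro z hz
      simp only [Option.mem_def, Option.some.injEq] at hz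
      subst hz; exact h

theorem run_not_mem_drop (x : Int) (ys : List Int) (hxle : ∀ z ∈ ys, x ≤ z)
    (hp : ys.Pairwise (· ≤ ·)) : x ∉ ys.drop (pvRun x ys) := by
  intro hx
  cases hd : ys.drop (pvRun x ys) with
  | nil => rw [hd] at hx; simp at hx
  | cons b t' =>
    rw [hd] at hx
    have hbx : b ≠ x := pvRun_drop_head_ne x ys b (by rw [hd]; simp)
    have hbmem : b ∈ ys.drop (pvRun x ys) := by rw [hd]; exact List.mem_cons_self
    have hxb : x ≤ b := hxle b (List.mem_of_mem_drop hbmem)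
    rcases List.mem_cons.mp hx with rfl | hx'
    · exact hbx rfl
    · have hpd : (b :: t').Pairwise (· ≤ ·) := hd ▸ List.Pairwise.sublist (List.drop_sublist _ _) hp
      have hbz : b ≤ x := (List.pairwise_cons.mp hpd).1 x hx'
      exact hbx (le_antisymm hbz hxb)

-- sorted lists are Pairwise (· ≤ ·)
theorem sorted_id_pairwise_le (xs : List Int) :
    (PySem.List.sorted xs (fun x => x) false).Pairwise (· ≤ ·) := by
  rw [List.pairwise_iff_getElem]
  intro i j hi hj hij
  exact PySem.List.sorted_id_getElem_mono xs (Nat.le_of_lt hij) hj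

theorem countP_split (p q : Int → Bool) (l : List Int) :
    List.countP p l = List.countP p (l.filter q) + List.countP p (l.filter (fun x => !(q x))) := by
  induction l with
  | nil => simp
  | cons a l ih =>
    by_cases hp : p a <;> by_cases hq : q a <;>
      simp [hq, hp, ih] <;> omega

-- splitting pvDup at one value s
theorem pvDup_split (D : List Int) (s : Int) :
    pvDup D = (if 1 < D.count s then ((D.count s : Int)) else 0)
      + pvDup (D.filter (fun x => !(x == s))) := by
  unfold pvDup
  rw [← List.countP_eq_length_filter, ← List.countP_eq_length_filter,
      countP_split (fun z => decide (1 < D.count z)) (fun x => x == s) D]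
  have h1 : List.countP (fun z => decide (1 < D.count z)) (D.filter (fun x => x == s))
      = if 1 < D.count s then D.count s else 0 := by
    rw [List.filter_beq, List.countP_replicate]
    simp
  have h2 : List.countP (fun z => decide (1 < D.count z)) (D.filter (fun x => !(x == s)))
      = List.countP (fun z => decide (1 < (D.filter (fun x => !(x == s))).count z))
          (D.filter (fun x => !(x == s))) := by
    refine List.countP_congr ?_
    intro x hx
    have hxs : x ≠ s := by simpa using List.of_mem_filter hx
    rw [List.count_filter (by simp [hxs])]
  rw [h1, h2]
  split_ifs <;> push_cast <;> ring

-- the run scan computes pvDup on a sorted list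
theorem pvScan_eq_pvDup : ∀ (xs : List Int), xs.Pairwise (· ≤ ·) → pvScan xs = pvDup xs := by
  intro xs
  induction xs using pvScan.induct with
  | case1 => intro _; simp [pvScan, pvDup]
  | case2 x ys ih =>
    intro h
    obtain ⟨hxle, hpys⟩ := List.pairwise_cons.mp h
    have hpt : (ys.drop (pvRun x ys)).Pairwise (· ≤ ·) :=
      List.Pairwise.sublist (List.drop_sublist _ _) hpys
    have hxt : x ∉ ys.drop (pvRun x ys) := run_not_mem_drop x ys hxle hpys
    have hys : ys = List.replicate (pvRun x ys) x ++ ys.drop (pvRun x ys) := by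
      conv_lhs => rw [← List.take_append_drop (pvRun x ys) ys]
      rw [pvRun_take]
    have hcx : (x :: ys).count x = pvRun x ys + 1 := by
      conv_lhs => rw [hys]
      simp [List.count_append, List.count_eq_zero.mpr hxt]
    have hct : ∀ z ∈ ys.drop (pvRun x ys), (x :: ys).count z = (ys.drop (pvRun x ys)).count z := by
      intro z hz
      have hzx : z ≠ x := fun e => hxt (e ▸ hz)
      conv_lhs => rw [hys]
      have hxz : x ≠ z := Ne.symm hzx
      simp [List.count_append, List.count_replicate, hxz]
    have hdup : pvDup (x :: ys)
        = (if 1 < pvRun x ys + 1 then ((pvRun x ys : Int) + 1) else 0) + pvDup (ys.drop (pvRun x ys)) := by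
      unfold pvDup
      rw [← List.countP_eq_length_filter, ← List.countP_eq_length_filter]
      have hx2 : (x :: ys) = List.replicate (pvRun x ys + 1) x ++ ys.drop (pvRun x ys) := by
        conv_lhs => rw [hys]
        simp [List.replicate_succ]
      have hsplit := congrArg (List.countP (fun z => decide (1 < (x :: ys).count z))) hx2
      rw [List.countP_append, List.countP_replicate] at hsplit
      rw [hsplit, List.countP_congr (q := fun z => decide (1 < (ys.drop (pvRun x ys)).count z))
            (fun z hz => by rw [hct z hz])]
      rw [hcx]
      simp only [decide_eq_true_eq]
      split_ifs <;> push_cast <;> omega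
    have hstep : pvScan (x :: ys)
        = (if pvRun x ys + 1 > 1 then ((pvRun x ys : Int) + 1) else 0) + pvScan (ys.drop (pvRun x ys)) := by
      rw [pvScan]
    rw [hstep, ih hpt, hdup]

-- A's final loop's sum over any nodup superset of D's values computes pvDup D
theorem sum_ite_counts (S : List Int) : ∀ (D : List Int), S.Nodup → (∀ x ∈ D, x ∈ S) →
    ((S.map (fun n => if 1 < ((D.count n : Int)) then ((D.count n : Int)) else 0)).sum) = pvDup D := by
  induction S with
  | nil =>
    intro D _ hsub
    have hD : D = [] := List.eq_nil_iff_forall_not_mem.mpr (fun x hx => by simpa using hsub x hx)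
    subst hD; simp [pvDup]
  | cons s S' ih =>
    intro D hnd hsub
    have hs : s ∉ S' := (List.nodup_cons.mp hnd).1
    have hnd' : S'.Nodup := (List.nodup_cons.mp hnd).2
    have hcnt : ∀ n ∈ S', D.count n = (D.filter (fun x => !(x == s))).count n := by
      intro n hn
      have hns : n ≠ s := fun e => hs (e ▸ hn)
      rw [List.count_filter (by simp [hns])]
    have hsub' : ∀ x ∈ D.filter (fun x => !(x == s)), x ∈ S' := by
      intro x hx
      have hmem := List.mem_of_mem_filter hx
      have hne : x ≠ s := by simpa using List.of_mem_filter hx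
      rcases List.mem_cons.mp (hsub x hmem) with rfl | h
      · exact absurd rfl hne
      · exact h
    simp only [List.map_cons, List.sum_cons]
    rw [List.map_congr_left (fun n hn => by rw [hcnt n hn]),
        ih (D.filter (fun x => !(x == s))) hnd' hsub', pvDup_split D s]
    have hcast : ((1 : Int) < (D.count s : Int)) ↔ 1 < D.count s := by exact_mod_cast Iff.rfl
    congr 1
    split_ifs with h1 h2 h2 <;> first | rfl | (exact absurd (hcast.mp h1) h2) | (exact absurd (hcast.mpr h2) h1)

theorem zeroFill_getD : ∀ (l : List Int) (d : PySem.Dict Int Int),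
    (∀ k, d.getD k 0 = 0) → ∀ v, (l.foldl (fun d n => d.insert n 0) d).getD v 0 = 0 := by
  intro l
  induction l with
  | nil => intro d h v; exact h v
  | cons n l ih =>
    intro d h v
    simp only [List.foldl_cons]
    refine ih _ (fun k => ?_) v
    rw [PySem.Dict.getD_insert]
    split
    · rfl
    · exact h k

-- A computes the sum of the over-1 diagonal counts over the pre-filled key range
theorem A_eq_sum (gen : List Int) :
    encuentra_conflictos_da gen =
      ((PySem.List.pyRange 0 (PySem.List.len gen * 2 - 1)).map
        (fun n => if 1 < (((pvDiag gen).count n : Int)) then (((pvDiag gen).count n : Int)) else 0)).sum := by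
  have hdiag : pvDiag gen
      = (PySem.List.pyRange 0 (PySem.List.len gen)).map (fun j => j + PySem.List.pyGetD gen j 0) := by
    unfold pvDiag
    rw [PySem.List.enumerate_eq_map_pyRange gen 0]
    simp [List.map_map, Function.comp]
  have hfold : ∀ d0 : PySem.Dict Int Int,
      (PySem.List.pyRange 0 (PySem.List.len gen)).foldl
        (fun d n => d.insert (n + PySem.List.pyGetD gen n 0)
          (d.getD (n + PySem.List.pyGetD gen n 0) 0 + 1)) d0
      = (pvDiag gen).foldl (fun d x => d.insert x (d.getD x 0 + 1)) d0 := by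
    intro d0
    rw [hdiag, List.foldl_map]
  have hd1 : ∀ n : Int,
      ((PySem.List.pyRange 0 (PySem.List.len gen)).foldl
        (fun d n => d.insert (n + PySem.List.pyGetD gen n 0)
          (d.getD (n + PySem.List.pyGetD gen n 0) 0 + 1))
        ((PySem.List.pyRange 0 (PySem.List.len gen * 2 - 1)).foldl
          (fun d n => d.insert n 0) PySem.Dict.empty)).getD n 0
      = ((pvDiag gen).count n : Int) := by
    intro n
    rw [hfold, PySem.Dict.getD_foldl_insert_add_one,
        zeroFill_getD _ _ (fun k => PySem.Dict.getD_empty k 0), zero_add]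
  simp only [encuentra_conflictos_da]
  rw [PySem.List.foldl_congr_mem _ _
        (fun c n => c + (if 1 < (((pvDiag gen).count n : Int)) then (((pvDiag gen).count n : Int)) else 0)) _
        (fun acc n _ => by beta_reduce; rw [hd1 n]; split_ifs <;> omega),
      PySem.List.foldl_add, zero_add]

theorem B_eq_pvDup (gen : List Int) : encuentra_conflictos_da_alt gen = pvDup (pvDiag gen) := by
  unfold encuentra_conflictos_da_alt
  rw [pvScan_eq_pvDup _ (sorted_id_pairwise_le (pvDiag gen))]
  have hperm : (PySem.List.sorted (pvDiag gen) (fun x => x) false).Perm (pvDiag gen) :=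
    PySem.List.sorted_perm (pvDiag gen) (fun x => x) false
  unfold pvDup
  rw [← List.countP_eq_length_filter, ← List.countP_eq_length_filter]
  rw [List.countP_congr (q := fun z => decide (1 < (pvDiag gen).count z))
        (fun x _ => by rw [hperm.count_eq]), hperm.countP_eq]

-- ===== VERDICT (by name: the statement is the Claim_ definition above) =====
theorem encuentra_conflictos_da_spec : Claim_equal_encuentra_conflictos_da := by
  intro gen _ hpre
  unfold Spec_encuentra_conflictos_da
  rw [A_eq_sum, B_eq_pvDup]
  apply sum_ite_counts _ _ (PySem.List.nodup_pyRange_one _ _)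
  intro x hx
  simp only [pvDiag, List.mem_map] at hx
  obtain ⟨p, hp, rfl⟩ := hx
  exact PySem.List.mem_pyRange_one.mpr (hpre p hp)
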